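-- pv_equiv track=rewrite | github.com/Tait20114731/python-project | dictionary_ass2.py | binary_search_dict
-- ===== SOURCE A (Python) =====
-- def binary_search_dict(dictionary, key):
--     keys = sorted(dictionary.keys())
--     begin_index = 0
--     end_index = len(keys) - 1
--     while begin_index <= end_index:
--         midpoint = begin_index + (end_index - begin_index) // 2
--         midpoint_key = keys[midpoint]
--         if midpoint_key == key:
--             return midpoint_key, dictionary[midpoint_key]
--         elif key < midpoint_key:
--             end_index = midpoint - 1
--         else:
--             begin_index = midpoint + 1
--     return None
-- ===== SOURCE B (Python) =====
-- def binary_search_dict(dictionary, key):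
--     # Direct hash lookup: keys are ints, so the binary search over sorted keys
--     # succeeds exactly when the key is present in the dict.
--     if key in dictionary:
--         return key, dictionary[key]
--     return None
-- ===== Notes on version B (the rewrite author's own statement) =====
-- stated objective: faster
-- what changed: Replaces the sort-then-binary-search over the key list by a single direct dict membership test and lookup, removing the sort and the loop entirely.
import Mathlib
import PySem

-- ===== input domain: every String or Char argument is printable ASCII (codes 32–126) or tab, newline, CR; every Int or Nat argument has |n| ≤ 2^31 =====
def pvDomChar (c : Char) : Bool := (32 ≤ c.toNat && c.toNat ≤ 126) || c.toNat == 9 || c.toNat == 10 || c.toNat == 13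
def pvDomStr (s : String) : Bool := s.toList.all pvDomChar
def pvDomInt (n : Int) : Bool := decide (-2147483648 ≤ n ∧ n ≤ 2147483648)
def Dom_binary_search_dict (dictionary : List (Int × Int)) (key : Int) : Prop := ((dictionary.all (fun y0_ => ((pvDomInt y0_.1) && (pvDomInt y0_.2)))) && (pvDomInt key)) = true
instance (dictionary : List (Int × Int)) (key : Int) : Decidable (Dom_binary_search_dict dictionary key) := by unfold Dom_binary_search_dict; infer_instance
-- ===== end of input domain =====

-- B replaces A's sort + binary search by one direct dict lookup (faster: no sort, no loop).

-- ===== PORT A =====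
-- the while loop of A, on the sorted key list; lo/hi are begin_index/end_index
def bsLoop (d : PySem.Dict Int Int) (keys : List Int) (key : Int) (lo hi : Int) : Option (Int × Int) :=
  if _h : lo ≤ hi then
    let mid := lo + PySem.Int.floordiv (hi - lo) 2
    match PySem.List.pyGet? keys mid with
    | none => none   -- unreachable IndexError guard (mid is always in range)
    | some mk =>
      if mk = key then
        match d.get? mk with
        | some v => some (mk, v)
        | none => none   -- unreachable KeyError guard (mk comes from d.keys)
      else if key < mk then bsLoop d keys key lo (mid - 1)
      else bsLoop d keys key (mid + 1) hi
  else none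
termination_by (hi + 1 - lo).toNat
decreasing_by
  all_goals
    rw [PySem.Int.floordiv_eq_ediv_of_pos (by omega)]
    omega

def binary_search_dict (dictionary : List (Int × Int)) (key : Int) : Option (Int × Int) :=
  let d := PySem.Dict.ofList dictionary
  let keys := PySem.List.sorted d.keys (fun x => x) false
  bsLoop d keys key 0 (PySem.List.len keys - 1)

-- ===== PORT B =====
def binary_search_dict_alt (dictionary : List (Int × Int)) (key : Int) : Option (Int × Int) :=
  match (PySem.Dict.ofList dictionary).get? key with
  | some v => some (key, v)
  | none => none

-- ===== PRECONDITION & SPEC =====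
def Spec_binary_search_dict (dictionary : List (Int × Int)) (key : Int) (out : Option (Int × Int)) : Prop := out = binary_search_dict_alt dictionary key
instance (dictionary : List (Int × Int)) (key : Int) (out : Option (Int × Int)) : Decidable (Spec_binary_search_dict dictionary key out) := by unfold Spec_binary_search_dict; infer_instance

-- ===== CLAIM (what is proved, stated in full; the proofs are below) =====
def Claim_equal_binary_search_dict : Prop := ∀ (dictionary : List (Int × Int)) (key : Int), Dom_binary_search_dict dictionary key → Spec_binary_search_dict dictionary key (binary_search_dict dictionary key)

-- ===== LEMMAS AND PROOFS =====

-- the loop on a strictly sorted key list finds key iff some index in [lo, hi] holds it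
theorem bsLoop_eq (d : PySem.Dict Int Int) (keys : List Int) (key : Int)
    (hs : keys.Pairwise (· < ·))
    (hd : ∀ x ∈ keys, d.contains x = true)
    (lo hi : Int) (hlo : 0 ≤ lo) (hhi : hi < (keys.length : Int)) :
    bsLoop d keys key lo hi =
      if ∃ i : Fin keys.length, lo ≤ (i : Int) ∧ (i : Int) ≤ hi ∧ keys[(i : Nat)] = key then
        (match d.get? key with | some v => some (key, v) | none => none)
      else none := by
  have hget := List.pairwise_iff_getElem.mp hs
  revert hlo hhi
  induction lo, hi using bsLoop.induct d keys key with
  | case1 lo hi hle mid hnone =>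
    intro hlo hhi
    have hmiddef : mid = lo + PySem.Int.floordiv (hi - lo) 2 := rfl
    have hmid : lo ≤ mid ∧ mid ≤ hi := by
      rw [hmiddef, PySem.Int.floordiv_eq_ediv_of_pos (by omega)]; omega
    rw [PySem.List.pyGet?_eq_none_iff] at hnone
    exact absurd (by simp [PySem.Raise.InRange]; omega) hnone
  | case2 lo hi hle mid v hmk hv =>
    intro hlo hhi
    have hmiddef : mid = lo + PySem.Int.floordiv (hi - lo) 2 := rfl
    have hmid : lo ≤ mid ∧ mid ≤ hi := by
      rw [hmiddef, PySem.Int.floordiv_eq_ediv_of_pos (by omega)]; omega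
    have hlt : mid < (keys.length : Int) := by omega
    have hkm : keys[mid.toNat] = key := by
      have := PySem.List.pyGet?_eq_some_getElem (xs := keys) (i := mid) (by omega) hlt
      rw [hmk] at this; exact (Option.some_inj.mp this).symm
    rw [if_pos (⟨⟨mid.toNat, by omega⟩, by simp; omega, by simp; omega, hkm⟩ :
      ∃ i : Fin keys.length, lo ≤ (i : Int) ∧ (i : Int) ≤ hi ∧ keys[(i : Nat)] = key)]
    rw [bsLoop, dif_pos hle]
    show (match PySem.List.pyGet? keys mid with
      | none => none
      | some mk =>
        if mk = key then
          match d.get? mk with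
          | some v => some (mk, v)
          | none => none
        else if key < mk then bsLoop d keys key lo (mid - 1)
        else bsLoop d keys key (mid + 1) hi) = _
    simp [hmk, hv]
  | case3 lo hi hle mid hmk hnone =>
    intro hlo hhi
    have hmem : key ∈ keys := PySem.List.mem_of_pyGet?_eq_some keys hmk
    have := hd key hmem
    rw [PySem.Dict.get?_eq_none_iff_contains] at hnone
    simp [hnone] at this
  | case4 lo hi hle mid mk hmk hne hlt ih =>
    intro hlo hhi
    have hmiddef : mid = lo + PySem.Int.floordiv (hi - lo) 2 := rfl
    have hmid : lo ≤ mid ∧ mid ≤ hi := by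
      rw [hmiddef, PySem.Int.floordiv_eq_ediv_of_pos (by omega)]; omega
    have hmlt : mid < (keys.length : Int) := by omega
    have hkm : keys[mid.toNat] = mk := by
      have := PySem.List.pyGet?_eq_some_getElem (xs := keys) (i := mid) (by omega) hmlt
      rw [hmk] at this; exact (Option.some_inj.mp this).symm
    have hiff : (∃ i : Fin keys.length, lo ≤ (i : Int) ∧ (i : Int) ≤ hi ∧ keys[(i : Nat)] = key) ↔
        (∃ i : Fin keys.length, lo ≤ (i : Int) ∧ (i : Int) ≤ mid - 1 ∧ keys[(i : Nat)] = key) := by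
      constructor
      · rintro ⟨i, h1, h2, h3⟩
        refine ⟨i, h1, ?_, h3⟩
        by_contra hbad
        rcases Nat.lt_or_ge mid.toNat (i : Nat) with hc | hc
        · have := hget mid.toNat (i : Nat) (by omega) i.isLt hc
          rw [hkm, h3] at this; omega
        · have hieq : (i : Nat) = mid.toNat := by omega
          simp only [hieq] at h3
          exact hne (hkm.symm.trans h3)
      · rintro ⟨i, h1, h2, h3⟩; exact ⟨i, h1, by omega, h3⟩
    rw [bsLoop, dif_pos hle]
    show (match PySem.List.pyGet? keys mid with
      | none => none
      | some mk =>
        if mk = key then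
          match d.get? mk with
          | some v => some (mk, v)
          | none => none
        else if key < mk then bsLoop d keys key lo (mid - 1)
        else bsLoop d keys key (mid + 1) hi) = _
    simp only [hmk, if_neg hne, if_pos hlt]
    rw [ih (by omega) (by omega)]
    simp only [hiff]
  | case5 lo hi hle mid mk hmk hne hnlt ih =>
    intro hlo hhi
    have hmiddef : mid = lo + PySem.Int.floordiv (hi - lo) 2 := rfl
    have hmid : lo ≤ mid ∧ mid ≤ hi := by
      rw [hmiddef, PySem.Int.floordiv_eq_ediv_of_pos (by omega)]; omega
    have hmlt : mid < (keys.length : Int) := by omega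
    have hkm : keys[mid.toNat] = mk := by
      have := PySem.List.pyGet?_eq_some_getElem (xs := keys) (i := mid) (by omega) hmlt
      rw [hmk] at this; exact (Option.some_inj.mp this).symm
    have hmklt : mk < key := lt_of_le_of_ne (not_lt.mp hnlt) hne
    have hiff : (∃ i : Fin keys.length, lo ≤ (i : Int) ∧ (i : Int) ≤ hi ∧ keys[(i : Nat)] = key) ↔
        (∃ i : Fin keys.length, mid + 1 ≤ (i : Int) ∧ (i : Int) ≤ hi ∧ keys[(i : Nat)] = key) := by
      constructor
      · rintro ⟨i, h1, h2, h3⟩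
        refine ⟨i, ?_, h2, h3⟩
        by_contra hbad
        rcases Nat.lt_or_ge (i : Nat) mid.toNat with hc | hc
        · have := hget (i : Nat) mid.toNat (by omega) (by omega) hc
          rw [hkm, h3] at this; omega
        · have hieq : (i : Nat) = mid.toNat := by omega
          simp only [hieq] at h3
          exact hne (hkm.symm.trans h3)
      · rintro ⟨i, h1, h2, h3⟩; exact ⟨i, by omega, h2, h3⟩
    rw [bsLoop, dif_pos hle]
    show (match PySem.List.pyGet? keys mid with
      | none => none
      | some mk =>
        if mk = key then
          match d.get? mk with
          | some v => some (mk, v)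
          | none => none
        else if key < mk then bsLoop d keys key lo (mid - 1)
        else bsLoop d keys key (mid + 1) hi) = _
    simp only [hmk, if_neg hne, if_neg hnlt]
    rw [ih (by omega) hhi]
    simp only [hiff]
  | case6 lo hi hgt =>
    intro hlo hhi
    rw [bsLoop]
    rw [dif_neg hgt, if_neg]
    rintro ⟨i, h1, h2, _⟩; omega

theorem binary_search_dict_spec : Claim_equal_binary_search_dict := by
  intro dictionary key _
  unfold Spec_binary_search_dict binary_search_dict binary_search_dict_alt
  set d := PySem.Dict.ofList dictionary with hddef
  set keys := PySem.List.sorted d.keys (fun x => x) false with hkdef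
  have hnd : d.keys.Nodup := PySem.Dict.nodup_keys_ofList dictionary
  have hperm : keys.Perm d.keys := PySem.List.sorted_perm d.keys (fun x => x) false
  have hknd : keys.Nodup := hperm.nodup_iff.mpr hnd
  have hle : keys.Pairwise (fun a b => a ≤ b) := PySem.List.sorted_pairwise d.keys (fun x => x)
  have hs : keys.Pairwise (· < ·) :=
    (hle.and hknd).imp (fun h => lt_of_le_of_ne h.1 h.2)
  have hd : ∀ x ∈ keys, d.contains x = true := by
    intro x hx
    exact (PySem.Dict.contains_iff_mem_keys d x).mpr (hperm.mem_iff.mp hx)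
  rw [bsLoop_eq d keys key hs hd 0 (PySem.List.len keys - 1) (by omega)
      (by simp [PySem.List.len_eq])]
  by_cases hmem : key ∈ keys
  · rcases List.mem_iff_getElem.mp hmem with ⟨i, hi, hki⟩
    have hsome : ∃ v, d.get? key = some v := by
      have hck : d.contains key = true := hd key hmem
      rcases h : d.get? key with _ | v
      · rw [PySem.Dict.get?_eq_none_iff_contains] at h; simp [h] at hck
      · exact ⟨v, rfl⟩
    rcases hsome with ⟨v, hv⟩
    rw [if_pos (⟨⟨i, hi⟩, by simp, by simp [PySem.List.len_eq]; omega, hki⟩ :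
      ∃ j : Fin keys.length, (0:Int) ≤ (j : Int) ∧ (j : Int) ≤ PySem.List.len keys - 1 ∧ keys[(j : Nat)] = key), hv]
  · have hnone : d.get? key = none := by
      rw [PySem.Dict.get?_eq_none_iff_not_mem_keys]
      exact fun h => hmem (hperm.mem_iff.mpr h)
    rw [if_neg (by rintro ⟨i, _, _, h3⟩; exact hmem (h3 ▸ List.getElem_mem _)), hnone]
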